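-- pv_equiv track=rewrite | github.com/mohamedAlaa26/RecommendationSystem | recommendation.py | get_user_stats
-- ===== SOURCE A (Python) =====
-- def get_user_stats(user, items, history):
--     stats = {}
--     for item in items:
--         stats[item] = []
--         for purchase in history:
--             if item in purchase:
--                 for other_item in purchase:
--                     if other_item != item:
--                         stats[item].append(other_item)
--     return stats
-- ===== SOURCE B (Python) =====
-- def get_user_stats(user, items, history):
--     # One pass over history: for each purchase, credit each distinct item
--     # appearing in it (and tracked in stats) with the other items bought.
--     stats = {item: [] for item in items}
--     for purchase in history:
--         for item in dict.fromkeys(purchase):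
--             if item in stats:
--                 stats[item].extend(o for o in purchase if o != item)
--     return stats
-- ===== Notes on version B (the rewrite author's own statement) =====
-- stated objective: faster
-- what changed: Instead of scanning the whole history once per item (nested items x history x purchase loops), B makes a single pass over the history, crediting each distinct item of a purchase with its co-purchased items via one dict lookup.
import Mathlib
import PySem

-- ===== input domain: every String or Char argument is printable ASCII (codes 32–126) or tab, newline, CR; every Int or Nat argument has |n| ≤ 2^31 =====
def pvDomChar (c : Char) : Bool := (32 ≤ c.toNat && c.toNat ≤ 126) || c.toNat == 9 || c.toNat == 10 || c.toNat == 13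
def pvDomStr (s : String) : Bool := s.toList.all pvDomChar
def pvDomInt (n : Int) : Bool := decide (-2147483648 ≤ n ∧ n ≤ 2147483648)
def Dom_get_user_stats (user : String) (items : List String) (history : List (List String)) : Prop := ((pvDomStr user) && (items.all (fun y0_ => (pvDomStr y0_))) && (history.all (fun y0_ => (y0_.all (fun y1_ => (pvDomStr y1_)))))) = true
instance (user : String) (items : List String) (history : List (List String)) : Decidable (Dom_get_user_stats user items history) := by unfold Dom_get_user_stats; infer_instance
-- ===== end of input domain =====

-- B replaces A's per-item rescans of the whole history by a single pass over the
-- history that credits each distinct item of a purchase at once (objective: faster).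

-- ===== PORT A =====
-- stats[item].append(x) is ported as modify item [] (· ++ [x]); the key was just
-- inserted, so the default [] is never used.
def get_user_stats (user : String) (items : List String) (history : List (List String)) : List (String × List String) :=
  (items.foldl (fun (stats : PySem.Dict String (List String)) item =>
      history.foldl (fun stats purchase =>
        if purchase.contains item then
          purchase.foldl (fun stats other_item =>
            if other_item ≠ item then stats.modify item [] (· ++ [other_item]) else stats) stats
        else stats)
      (stats.insert item [])) PySem.Dict.empty).items

-- ===== PORT B =====
-- dict.fromkeys(purchase) (ordered dedup) is PySem.List.dedup.
def get_user_stats_alt (user : String) (items : List String) (history : List (List String)) : List (String × List String) :=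
  (history.foldl (fun (stats : PySem.Dict String (List String)) purchase =>
      (PySem.List.dedup purchase).foldl (fun stats item =>
        if stats.contains item then
          stats.modify item [] (· ++ purchase.filter (fun o => o ≠ item))
        else stats) stats)
    (items.foldl (fun (d : PySem.Dict String (List String)) item => d.insert item ([] : List String)) PySem.Dict.empty)).items

-- ===== PRECONDITION & SPEC =====
def Spec_get_user_stats (user : String) (items : List String) (history : List (List String)) (out : List (String × List String)) : Prop := out = get_user_stats_alt user items history
instance (user : String) (items : List String) (history : List (List String)) (out : List (String × List String)) : Decidable (Spec_get_user_stats user items history out) := by unfold Spec_get_user_stats; infer_instance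

-- ===== CLAIM (what is proved, stated in full; the proofs are below) =====
def Claim_equal_get_user_stats : Prop := ∀ (user : String) (items : List String) (history : List (List String)), Dom_get_user_stats user items history → Spec_get_user_stats user items history (get_user_stats user items history)

-- ===== LEMMAS AND PROOFS =====

-- the co-purchase list both programs accumulate for a key k
def pvCollect (k : String) (h : List (List String)) : List String :=
  h.flatMap (fun p => if p.contains k then p.filter (fun o => o ≠ k) else [])

theorem pvCollect_nil (k : String) : pvCollect k [] = [] := rfl

theorem pvCollect_cons (k : String) (p : List String) (h : List (List String)) :
    pvCollect k (p :: h) = (if p.contains k then p.filter (fun o => o ≠ k) else []) ++ pvCollect k h := by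
  simp [pvCollect]

-- ---- A side ----

theorem pvA_inner_getD (it : String) (p : List String) :
    ∀ (d : PySem.Dict String (List String)) (k : String),
      (p.foldl (fun stats o => if o ≠ it then stats.modify it [] (· ++ [o]) else stats) d).getD k []
        = if k = it then d.getD it [] ++ p.filter (fun o => o ≠ it) else d.getD k [] := by
  induction p with
  | nil => intro d k; by_cases hk : k = it <;> simp [hk]
  | cons o p ih =>
    intro d k
    simp only [List.foldl_cons]
    by_cases ho : o = it
    · rw [if_neg (by simp [ho]), ih]
      simp [ho]
    · rw [if_pos ho, ih, PySem.Dict.getD_modify]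
      by_cases hk : k = it
      · simp [hk, List.filter_cons, ho]
      · simp [hk, PySem.Dict.getD_modify_of_ne]

theorem pvA_inner_keys (it : String) (p : List String) :
    ∀ (d : PySem.Dict String (List String)), d.contains it = true →
      (p.foldl (fun stats o => if o ≠ it then stats.modify it [] (· ++ [o]) else stats) d).keys = d.keys := by
  induction p with
  | nil => intro d _; rfl
  | cons o p ih =>
    intro d hc
    simp only [List.foldl_cons]
    by_cases ho : o = it
    · rw [if_neg (by simp [ho]), ih _ hc]
    · have hk : (d.modify it [] (· ++ [o])).keys = d.keys := by
        rw [PySem.Dict.keys_modify, PySem.Dict.keys_insert_of_contains _ _ hc]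
      have hc' : (d.modify it [] (· ++ [o])).contains it = true := by
        rw [PySem.Dict.contains_iff_mem_keys, hk, ← PySem.Dict.contains_iff_mem_keys]; exact hc
      rw [if_pos ho, ih _ hc', hk]

theorem pvA_hist_keys (it : String) (history : List (List String)) :
    ∀ (d : PySem.Dict String (List String)), d.contains it = true →
      (history.foldl (fun stats purchase =>
        if purchase.contains it then
          purchase.foldl (fun stats other_item =>
            if other_item ≠ it then stats.modify it [] (· ++ [other_item]) else stats) stats
        else stats) d).keys = d.keys := by
  induction history with
  | nil => intro d _; rfl
  | cons p h ih =>
    intro d hc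
    simp only [List.foldl_cons]
    by_cases hp : p.contains it
    · have hk := pvA_inner_keys it p d hc
      have hc' : (p.foldl (fun stats o => if o ≠ it then stats.modify it [] (· ++ [o]) else stats) d).contains it = true := by
        rw [PySem.Dict.contains_iff_mem_keys, hk, ← PySem.Dict.contains_iff_mem_keys]; exact hc
      rw [if_pos hp, ih _ hc', hk]
    · rw [if_neg hp, ih _ hc]

theorem pvA_hist_getD (it : String) (history : List (List String)) :
    ∀ (d : PySem.Dict String (List String)) (k : String), d.contains it = true →
      (history.foldl (fun stats purchase =>
        if purchase.contains it then
          purchase.foldl (fun stats other_item =>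
            if other_item ≠ it then stats.modify it [] (· ++ [other_item]) else stats) stats
        else stats) d).getD k []
        = if k = it then d.getD it [] ++ pvCollect it history else d.getD k [] := by
  induction history with
  | nil => intro d k _; rw [pvCollect_nil]; by_cases hk : k = it <;> simp [hk]
  | cons p h ih =>
    intro d k hc
    simp only [List.foldl_cons]
    by_cases hp : p.contains it
    · have hk := pvA_inner_keys it p d hc
      have hc' : (p.foldl (fun stats o => if o ≠ it then stats.modify it [] (· ++ [o]) else stats) d).contains it = true := by
        rw [PySem.Dict.contains_iff_mem_keys, hk, ← PySem.Dict.contains_iff_mem_keys]; exact hc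
      rw [if_pos hp, ih _ _ hc', pvA_inner_getD, pvA_inner_getD, pvCollect_cons, if_pos hp]
      split <;> simp
    · rw [if_neg hp, ih _ _ hc, pvCollect_cons, if_neg hp]
      split <;> simp

-- the outer loop of A, abstracted over the starting dict
theorem pvA_outer_keys (history : List (List String)) (items : List String) :
    ∀ (d : PySem.Dict String (List String)),
      (items.foldl (fun stats item =>
        history.foldl (fun stats purchase =>
          if purchase.contains item then
            purchase.foldl (fun stats other_item =>
              if other_item ≠ item then stats.modify item [] (· ++ [other_item]) else stats) stats
          else stats) (stats.insert item [])) d).keys = PySem.Set.update d.keys items := by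
  induction items with
  | nil => intro d; rfl
  | cons it rest ih =>
    intro d
    simp only [List.foldl_cons]
    rw [ih, pvA_hist_keys it history _ (PySem.Dict.contains_insert_self d it [])]
    rw [PySem.Set.update_cons]
    congr 1
    rw [PySem.Set.add_eq_ite]
    by_cases hm : it ∈ d.keys
    · rw [PySem.Dict.keys_insert_of_contains _ _ ((PySem.Dict.contains_iff_mem_keys d it).mpr hm), if_pos hm]
    · rw [PySem.Dict.keys_insert_of_not_contains _ _ (by
        cases hcc : d.contains it
        · rfl
        · exact absurd ((PySem.Dict.contains_iff_mem_keys d it).mp hcc) hm), if_neg hm]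

theorem pvA_outer_getD (history : List (List String)) (items : List String) :
    ∀ (d : PySem.Dict String (List String)) (k : String),
      (items.foldl (fun stats item =>
        history.foldl (fun stats purchase =>
          if purchase.contains item then
            purchase.foldl (fun stats other_item =>
              if other_item ≠ item then stats.modify item [] (· ++ [other_item]) else stats) stats
          else stats) (stats.insert item [])) d).getD k []
        = if k ∈ items then pvCollect k history else d.getD k [] := by
  induction items with
  | nil => intro d k; simp
  | cons it rest ih =>
    intro d k
    simp only [List.foldl_cons]
    rw [ih, pvA_hist_getD it history _ k (PySem.Dict.contains_insert_self d it [])]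
    by_cases hr : k ∈ rest
    · simp [hr]
    · by_cases hk : k = it
      · simp [hr, hk, PySem.Dict.getD_insert]
      · simp [hr, hk, PySem.Dict.getD_insert]

-- ---- B side ----

theorem pvB_init_getD (items : List String) :
    ∀ (d : PySem.Dict String (List String)) (k : String),
      (items.foldl (fun (d : PySem.Dict String (List String)) item => d.insert item ([] : List String)) d).getD k []
        = if k ∈ items then [] else d.getD k [] := by
  induction items with
  | nil => intro d k; simp
  | cons it rest ih =>
    intro d k
    simp only [List.foldl_cons]
    rw [ih, PySem.Dict.getD_insert]
    by_cases hr : k ∈ rest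
    · simp [hr]
    · by_cases hk : k = it <;> simp [hr, hk]

theorem pvB_step_keys (p : List String) (l : List String) :
    ∀ (d : PySem.Dict String (List String)),
      (l.foldl (fun stats item =>
        if stats.contains item then
          stats.modify item [] (· ++ p.filter (fun o => o ≠ item))
        else stats) d).keys = d.keys := by
  induction l with
  | nil => intro d; rfl
  | cons it rest ih =>
    intro d
    simp only [List.foldl_cons]
    by_cases hc : d.contains it
    · rw [if_pos hc, ih, PySem.Dict.keys_modify, PySem.Dict.keys_insert_of_contains _ _ hc]
    · rw [if_neg hc, ih]

theorem pvB_step_getD (p : List String) (l : List String) (hnd : l.Nodup) :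
    ∀ (d : PySem.Dict String (List String)) (k : String),
      (l.foldl (fun stats item =>
        if stats.contains item then
          stats.modify item [] (· ++ p.filter (fun o => o ≠ item))
        else stats) d).getD k []
        = d.getD k [] ++ (if d.contains k = true ∧ k ∈ l then p.filter (fun o => o ≠ k) else []) := by
  induction l with
  | nil => intro d k; simp
  | cons it rest ih =>
    intro d k
    obtain ⟨hit, hrest⟩ := List.nodup_cons.mp hnd
    simp only [List.foldl_cons]
    by_cases hc : d.contains it
    · rw [if_pos hc, ih hrest]
      have hck : (d.modify it [] (· ++ p.filter (fun o => o ≠ it))).contains k = d.contains k := by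
        rw [PySem.Dict.contains_modify]
        by_cases hk : k = it
        · subst hk; simp [hc]
        · simp [hk]
      rw [hck, PySem.Dict.getD_modify]
      by_cases hk : k = it
      · subst hk
        simp [hit, hc]
      · simp [hk]
    · rw [if_neg hc, ih hrest]
      by_cases hk : k = it
      · subst hk; simp [hc, hit]
      · simp [hk]

theorem pvB_hist_keys (history : List (List String)) :
    ∀ (d : PySem.Dict String (List String)),
      (history.foldl (fun stats purchase =>
        (PySem.List.dedup purchase).foldl (fun stats item =>
          if stats.contains item then
            stats.modify item [] (· ++ purchase.filter (fun o => o ≠ item))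
          else stats) stats) d).keys = d.keys := by
  induction history with
  | nil => intro d; rfl
  | cons p h ih =>
    intro d
    simp only [List.foldl_cons]
    rw [ih, pvB_step_keys]

theorem pvB_hist_getD (history : List (List String)) :
    ∀ (d : PySem.Dict String (List String)) (k : String),
      (history.foldl (fun stats purchase =>
        (PySem.List.dedup purchase).foldl (fun stats item =>
          if stats.contains item then
            stats.modify item [] (· ++ purchase.filter (fun o => o ≠ item))
          else stats) stats) d).getD k []
        = d.getD k [] ++ (if d.contains k = true then pvCollect k history else []) := by
  induction history with
  | nil => intro d k; simp [pvCollect_nil]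
  | cons p h ih =>
    intro d k
    simp only [List.foldl_cons]
    have hnd : (PySem.List.dedup p).Nodup := by
      rw [PySem.List.dedup_eq_ofList]; exact PySem.Set.nodup_ofList p
    have hck : ((PySem.List.dedup p).foldl (fun stats item =>
        if stats.contains item then
          stats.modify item [] (· ++ p.filter (fun o => o ≠ item))
        else stats) d).contains k = d.contains k := by
      rw [PySem.Dict.contains_eq_decide_mem_keys, PySem.Dict.contains_eq_decide_mem_keys, pvB_step_keys]
    rw [ih, hck, pvB_step_getD p _ hnd, pvCollect_cons]
    have hmem : k ∈ PySem.List.dedup p ↔ p.contains k = true := by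
      rw [PySem.List.dedup_eq_ofList, PySem.Set.mem_ofList, List.contains_iff_mem]
    by_cases hc : d.contains k
    · by_cases hp : p.contains k
      · simp [hc, hp, hmem.mpr hp]
      · have : k ∉ PySem.List.dedup p := fun hm => hp (hmem.mp hm)
        simp [hc, hp, this]
    · simp [hc]

-- ===== VERDICT (by name: the statement is the Claim_ definition above) =====
theorem get_user_stats_spec : Claim_equal_get_user_stats := by
  intro user items history _
  unfold Spec_get_user_stats get_user_stats get_user_stats_alt
  have hkA := pvA_outer_keys history items PySem.Dict.empty
  have hkB0 := PySem.Dict.keys_foldl_insert items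
      (f := fun (_ : PySem.Dict String (List String)) (_ : String) => ([] : List String)) PySem.Dict.empty
  have hkB := pvB_hist_keys history
      (items.foldl (fun (d : PySem.Dict String (List String)) item => d.insert item ([] : List String)) PySem.Dict.empty)
  rw [PySem.Dict.keys_empty] at hkA hkB0
  rw [hkB0] at hkB
  have hnd : (PySem.Set.update ([] : List String) items).Nodup :=
    PySem.Set.nodup_update _ _ List.nodup_nil
  rw [PySem.Dict.items_eq_map_keys _ (by rw [hkA]; exact hnd) [],
      PySem.Dict.items_eq_map_keys _ (by rw [hkB]; exact hnd) []]
  rw [hkA, hkB]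
  apply List.map_congr_left
  intro k _
  rw [pvA_outer_getD, pvB_hist_getD, pvB_init_getD, PySem.Dict.getD_empty]
  have hcB : (items.foldl (fun (d : PySem.Dict String (List String)) item => d.insert item ([] : List String)) PySem.Dict.empty).contains k
      = decide (k ∈ items) := by
    rw [PySem.Dict.contains_eq_decide_mem_keys, hkB0]
    by_cases hm : k ∈ items
    · simp [hm, (PySem.Set.mem_update ([] : List String) items k).mpr (Or.inr hm)]
    · have : k ∉ PySem.Set.update ([] : List String) items := by
        intro hmm
        rcases (PySem.Set.mem_update ([] : List String) items k).mp hmm with h | h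
        · exact absurd h (List.not_mem_nil)
        · exact hm h
      simp [hm, this]
  rw [hcB]
  by_cases hm : k ∈ items <;> simp [hm]
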